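-- pv_equiv track=rewrite | github.com/jisuuuu/Algorithm_Study | Programmers/bp_4.py | solution
-- ===== SOURCE A (Python) =====
-- import math
--
-- def solution(brown, yellow):
--     num = brown + yellow
--     new = []
--
--     for i in range(num, int(math.sqrt(num)) - 1, -1):
--         if num % i == 0:
--             new.append([i, num // i])
--
--     for n in new:
--         if n[1] == 1:
--             continue
--
--         if (n[0] - 2) * (n[1] - 2) == yellow:
--             return n
-- ===== SOURCE B (Python) =====
-- import math
--
-- def solution(brown, yellow):
--     # Solve the quadratic directly: the sides sum to (brown + 4) / 2 and multiply
--     # to brown + yellow, so they are the roots of x^2 - s*x + num = 0.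
--     num = brown + yellow
--     s2 = brown + 4
--     if s2 % 2 != 0:
--         return None
--     s = s2 // 2
--     disc = s * s - 4 * num
--     if disc < 0:
--         return None
--     r = math.isqrt(disc)
--     if r * r != disc:
--         return None
--     w = (s + r) // 2
--     h = s - w
--     if h < 2:
--         return None
--     return [w, h]
-- ===== Notes on version B (the rewrite author's own statement) =====
-- stated objective: faster
-- what changed: A scans every i from brown+yellow down to sqrt(brown+yellow) collecting divisor pairs and then rescans them; B solves the side-length quadratic in closed form (sum of sides = (brown+4)/2, product = brown+yellow) via one integer square root.
-- intended difference: On the two inputs in D_solution A returns a mirrored degenerate pair [1, brown+yellow] - a height-1 board that A's own n[1]==1 rule skips in its [num,1] orientation (at the witness (2,0) A returns [1,2]) - while B returns None, the intended answer since no board with both sides >= 2 exists there. — e.g. on solution(2, 0): A returns some [1, 2], B returns none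
import Mathlib
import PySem

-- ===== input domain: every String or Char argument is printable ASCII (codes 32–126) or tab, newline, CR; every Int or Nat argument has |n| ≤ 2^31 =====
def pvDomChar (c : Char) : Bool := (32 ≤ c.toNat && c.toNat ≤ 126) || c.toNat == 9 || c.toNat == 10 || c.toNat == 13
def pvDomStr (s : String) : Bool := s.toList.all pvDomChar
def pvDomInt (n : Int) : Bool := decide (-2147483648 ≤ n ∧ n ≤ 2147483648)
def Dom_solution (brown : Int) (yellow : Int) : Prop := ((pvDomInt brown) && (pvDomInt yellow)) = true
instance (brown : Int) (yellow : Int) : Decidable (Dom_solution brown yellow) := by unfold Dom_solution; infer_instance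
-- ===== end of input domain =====

-- B replaces A's O(num) divisor scan by solving the side-length quadratic in O(1);
-- on the two degenerate inputs in D_solution A returns a height-1 board its own skip rule
-- is meant to reject, and B returns none (see D_solution below).

-- ===== PORT A =====
-- kernel-reducible integer square root (downward search); equals Nat.sqrt (lemma pyIsqrt_eq
-- below), used to port int(math.sqrt(num)) / math.isqrt exactly on the admitted domain
def isqrtDown (n : Nat) : Nat → Nat
  | 0 => 0
  | (k+1) => if (k+1)*(k+1) ≤ n then k+1 else isqrtDown n k

def pyIsqrt (n : Nat) : Nat := isqrtDown n n

-- second loop of A: scan `new`, skip n[1]==1, return first n with (n[0]-2)*(n[1]-2)==yellow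
def solutionFind (yellow : Int) : List (Int × Int) → Option (List Int)
  | [] => none
  | n :: rest =>
    if n.2 = 1 then solutionFind yellow rest
    else if (n.1 - 2) * (n.2 - 2) = yellow then some [n.1, n.2]
    else solutionFind yellow rest

def solution (brown : Int) (yellow : Int) : Option (List Int) :=
  let num := brown + yellow
  -- int(math.sqrt(num)) ported as Nat.sqrt of num.toNat: exact for 0 ≤ num ≤ 2^32,
  -- i.e. on all of Dom; for num < 0 math.sqrt raises (excluded by Pre_solution)
  let new := (PySem.List.pyRange num ((pyIsqrt num.toNat : Int) - 1) (-1)).foldl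
      (fun acc i => if PySem.Int.mod num i = 0 then acc ++ [(i, PySem.Int.floordiv num i)] else acc) []
  solutionFind yellow new

-- ===== PORT B =====
def solution_alt (brown : Int) (yellow : Int) : Option (List Int) :=
  let num := brown + yellow
  let s2 := brown + 4
  if PySem.Int.mod s2 2 ≠ 0 then none else
  let s := PySem.Int.floordiv s2 2
  let disc := s * s - 4 * num
  if disc < 0 then none else
  let r : Int := (pyIsqrt disc.toNat : Int)   -- math.isqrt(disc); disc ≥ 0 here, exact
  if r * r ≠ disc then none else
  let w := PySem.Int.floordiv (s + r) 2
  let h := s - w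
  if h < 2 then none else some [w, h]

-- ===== PRECONDITION & SPEC =====
-- A raises unless brown + yellow ≥ 1 (math.sqrt ValueError for num < 0, ZeroDivisionError at num = 0)
def Pre_solution (brown : Int) (yellow : Int) : Prop := 1 ≤ brown + yellow
instance (brown : Int) (yellow : Int) : Decidable (Pre_solution brown yellow) := by unfold Pre_solution; infer_instance
def pvWitness_solution : Int × Int := (10, 2)

-- On the two inputs in D_solution A returns a mirrored degenerate pair [1, brown+yellow] —
-- a height-1 board that A's own `n[1] == 1` rule skips in its [num,1] orientation (at the
-- witness (2,0) A returns [1,2]) — while B returns none, the intended answer since no board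
-- with both sides ≥ 2 exists there.
def D_solution (brown : Int) (yellow : Int) : Prop :=
  (brown = 2 ∧ yellow = 0) ∨ (brown = 4 ∧ yellow = -1)
instance (brown : Int) (yellow : Int) : Decidable (D_solution brown yellow) := by unfold D_solution; infer_instance

def Spec_solution (brown : Int) (yellow : Int) (out : Option (List Int)) : Prop :=
  ¬ D_solution brown yellow → out = solution_alt brown yellow
instance (brown : Int) (yellow : Int) (out : Option (List Int)) : Decidable (Spec_solution brown yellow out) := by unfold Spec_solution; infer_instance

def pvDiffWitness_solution : Int × Int := (2, 0)
def pvDiffWitnessOut_solution : (Option (List Int)) × (Option (List Int)) := (some [1, 2], none)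

-- ===== CLAIM (what is proved, stated in full; the proofs are below) =====
def Claim_unchanged_solution : Prop := ∀ (brown : Int) (yellow : Int), Dom_solution brown yellow → Pre_solution brown yellow → Spec_solution brown yellow (solution brown yellow)
def Claim_changed_solution : Prop := Dom_solution (pvDiffWitness_solution.1) (pvDiffWitness_solution.2) ∧ Pre_solution (pvDiffWitness_solution.1) (pvDiffWitness_solution.2) ∧ D_solution (pvDiffWitness_solution.1) (pvDiffWitness_solution.2) ∧ solution (pvDiffWitness_solution.1) (pvDiffWitness_solution.2) = pvDiffWitnessOut_solution.1 ∧ solution_alt (pvDiffWitness_solution.1) (pvDiffWitness_solution.2) = pvDiffWitnessOut_solution.2 ∧ pvDiffWitnessOut_solution.1 ≠ pvDiffWitnessOut_solution.2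
def Claim_exact_solution : Prop := ∀ (brown : Int) (yellow : Int), Dom_solution brown yellow → Pre_solution brown yellow → D_solution brown yellow → solution brown yellow ≠ solution_alt brown yellow

-- ===== LEMMAS AND PROOFS =====

lemma isqrtDown_eq (n m : Nat) (h : Nat.sqrt n ≤ m) : isqrtDown n m = Nat.sqrt n := by
  induction m with
  | zero => simp only [isqrtDown]; omega
  | succ k ih =>
    simp only [isqrtDown]
    split_ifs with hle
    · have := Nat.le_sqrt.mpr hle
      omega
    · have hne : Nat.sqrt n ≠ k + 1 := by
        intro he
        exact hle (by rw [← he]; exact Nat.sqrt_le n)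
      exact ih (by omega)

lemma pyIsqrt_eq (n : Nat) : pyIsqrt n = Nat.sqrt n :=
  isqrtDown_eq n n (Nat.sqrt_le_self n)

-- the first loop of A builds exactly this list (see hA in the final proof)
def newList (num q : Int) : List (Int × Int) :=
  ((PySem.List.pyRange num (q - 1) (-1)).filter (fun i => decide (PySem.Int.mod num i = 0))).map
    (fun i => (i, PySem.Int.floordiv num i))

lemma newList_mem {num q : Int} {x : Int × Int} (hq1 : 1 ≤ q)
    (hx : x ∈ newList num q) : q ≤ x.1 ∧ x.1 ≤ num ∧ x.1 ∣ num ∧ x.2 = num / x.1 := by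
  unfold newList at hx
  rcases List.mem_map.mp hx with ⟨i, hi, rfl⟩
  rcases List.mem_filter.mp hi with ⟨hir, hmod⟩
  rcases PySem.List.mem_pyRange_neg_one.mp hir with ⟨h1, h2⟩
  have hipos : 0 < i := by omega
  have hdvd : i ∣ num := (PySem.Int.mod_eq_zero_iff_dvd num i).mp (by simpa using hmod)
  exact ⟨by omega, h2, hdvd, by simp [PySem.Int.floordiv_eq_ediv_of_pos hipos]⟩

lemma newList_mem_of {num q i : Int} (hipos : 0 < i) (hiq : q ≤ i) (hin : i ≤ num)
    (hdvd : i ∣ num) : (i, num / i) ∈ newList num q := by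
  unfold newList
  exact List.mem_map.mpr ⟨i, List.mem_filter.mpr
    ⟨PySem.List.mem_pyRange_neg_one.mpr ⟨by omega, hin⟩,
     by simp [(PySem.Int.mod_eq_zero_iff_dvd num i).mpr hdvd]⟩,
    by simp [PySem.Int.floordiv_eq_ediv_of_pos hipos]⟩

lemma newList_pairwise (num q : Int) : (newList num q).Pairwise (fun a b => b.1 < a.1) := by
  unfold newList
  refine List.pairwise_map.mpr (List.Pairwise.filter _ ?_)
  rw [PySem.List.pyRange_neg_one_eq_reverse]
  exact List.pairwise_reverse.mpr (PySem.List.pairwise_lt_pyRange_one _ _)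

lemma sqrtInt_lt_succ_sq {num : Int} (h : 0 ≤ num) :
    num < ((num.toNat.sqrt : Int) + 1) * ((num.toNat.sqrt : Int) + 1) := by
  have h1 := Nat.lt_succ_sqrt num.toNat
  have h2 : ((num.toNat : Int)) = num := Int.toNat_of_nonneg h
  rw [← h2]
  exact_mod_cast h1

lemma sqrtInt_pos {num : Int} (h : 1 ≤ num) : 1 ≤ (num.toNat.sqrt : Int) := by
  have : 0 < num.toNat.sqrt := Nat.sqrt_pos.mpr (by omega)
  exact_mod_cast this

lemma sqrtInt_le_of_sq_le {num w : Int} (hnum : 1 ≤ num) (h0 : 0 ≤ w) (h : num ≤ w * w) :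
    (num.toNat.sqrt : Int) ≤ w := by
  have hw : ((w.toNat : Int)) = w := Int.toNat_of_nonneg h0
  have h1 : num.toNat ≤ w.toNat * w.toNat := by
    have : ((num.toNat : Int)) ≤ ((w.toNat * w.toNat : Nat) : Int) := by
      push_cast
      rw [hw, Int.toNat_of_nonneg (by omega : (0:Int) ≤ num)]
      exact h
    exact_mod_cast this
  have h2 := Nat.sqrt_le_sqrt h1
  rw [Nat.sqrt_eq] at h2
  calc ((num.toNat.sqrt : Int)) ≤ (w.toNat : Int) := by exact_mod_cast h2
    _ = w := hw

-- a perfect square has an exact Nat.sqrt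
lemma sqrtInt_of_sq {d m : Int} (hm : m * m = d) :
    (d.toNat.sqrt : Int) * (d.toNat.sqrt : Int) = d := by
  have h1 : ((m.natAbs * m.natAbs : Nat) : Int) = d := by
    rw [Int.natAbs_mul_self]; exact hm
  have h2 : d.toNat = m.natAbs * m.natAbs := by omega
  rw [h2, Nat.sqrt_eq]
  exact h1

-- the predicate A's second loop tests (skip + area check)
def solP (yellow : Int) (n : Int × Int) : Prop := n.2 ≠ 1 ∧ (n.1 - 2) * (n.2 - 2) = yellow

lemma solutionFind_none (yellow : Int) (l : List (Int × Int))
    (h : ∀ n ∈ l, ¬ solP yellow n) : solutionFind yellow l = none := by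
  induction l with
  | nil => rfl
  | cons n rest ih =>
    have hn := h n (by simp)
    have hrest : ∀ m ∈ rest, ¬ solP yellow m := fun m hm => h m (by simp [hm])
    simp only [solutionFind]
    split_ifs with h1 h2
    · exact ih hrest
    · exact absurd ⟨h1, h2⟩ hn
    · exact ih hrest

lemma solutionFind_max (yellow : Int) (l : List (Int × Int))
    (hp : l.Pairwise (fun a b => b.1 < a.1)) (x : Int × Int) (hx : x ∈ l)
    (hpx : solP yellow x) (hmax : ∀ y ∈ l, solP yellow y → y.1 ≤ x.1) :
    solutionFind yellow l = some [x.1, x.2] := by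
  induction l with
  | nil => cases hx
  | cons n rest ih =>
    rcases List.mem_cons.mp hx with rfl | hx'
    · rcases hpx with ⟨h1, h2⟩
      simp only [solutionFind]
      rw [if_neg h1, if_pos h2]
    · have hlt : x.1 < n.1 := (List.pairwise_cons.mp hp).1 x hx'
      have hnP : ¬ solP yellow n := fun hPn =>
        absurd (hmax n (by simp) hPn) (by omega)
      simp only [solutionFind]
      split_ifs with h1 h2
      · exact ih (List.pairwise_cons.mp hp).2 hx' (fun y hy hPy => hmax y (by simp [hy]) hPy)
      · exact absurd ⟨h1, h2⟩ hnP
      · exact ih (List.pairwise_cons.mp hp).2 hx' (fun y hy hPy => hmax y (by simp [hy]) hPy)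


lemma solution_main (brown yellow : Int) (hpre : 1 ≤ brown + yellow)
    (hD : ¬ D_solution brown yellow) : solution brown yellow = solution_alt brown yellow := by
  have hA : solution brown yellow =
      solutionFind yellow (newList (brown + yellow) (((brown + yellow).toNat.sqrt : Int))) := by
    unfold solution newList
    simp only [pyIsqrt_eq, PySem.List.foldl_append_ite, List.nil_append]
  rw [hA]
  unfold solution_alt
  simp only [pyIsqrt_eq]
  set num := brown + yellow with hnum
  set q : Int := (num.toNat.sqrt : Int) with hqdef
  set s : Int := PySem.Int.floordiv (brown + 4) 2 with hsdef
  set disc : Int := s * s - 4 * num with hdiscdef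
  set r : Int := (disc.toNat.sqrt : Int) with hrdef
  set w : Int := PySem.Int.floordiv (s + r) 2 with hwdef
  clear_value num q s disc r w
  have hq1 : 1 ≤ q := by rw [hqdef]; exact sqrtInt_pos hpre
  have hq3 : num < (q + 1) * (q + 1) := by
    rw [hqdef]; exact sqrtInt_lt_succ_sq (by omega)
  -- facts about any member of `new` that A's second loop accepts
  have hmemP : ∀ x ∈ newList num q, solP yellow x →
      x.1 * x.2 = num ∧ 2 * (x.1 + x.2) = brown + 4 ∧ q ≤ x.1 ∧ 1 ≤ x.1 ∧ 1 ≤ x.2 := by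
    intro x hx hPx
    obtain ⟨hxq, hxle, hxdvd, hx2⟩ := newList_mem hq1 hx
    have hx1pos : 1 ≤ x.1 := by omega
    have hprod : x.1 * x.2 = num := by rw [hx2]; exact Int.mul_ediv_cancel' hxdvd
    have hx2pos : 1 ≤ x.2 := by nlinarith
    obtain ⟨hne1, harea⟩ := hPx
    refine ⟨hprod, ?_, hxq, hx1pos, hx2pos⟩
    linear_combination hprod - harea + hnum
  split_ifs with c1 c2 c3 c4
  -- branch 1: brown + 4 odd, no divisor pair can match
  · apply solutionFind_none
    intro n hn hPn
    obtain ⟨hprod, hsum, hnq, hn1, hn2⟩ := hmemP n hn hPn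
    apply c1
    rw [PySem.Int.mod_eq_emod_of_pos (by norm_num)]
    omega
  all_goals have hc1 : PySem.Int.mod (brown + 4) 2 = 0 := not_not.mp c1
  all_goals
    have hs : 2 * s = brown + 4 := by
      rw [PySem.Int.mod_eq_emod_of_pos (by norm_num : (0:Int) < 2)] at hc1
      rw [hsdef, PySem.Int.floordiv_eq_ediv_of_pos (by norm_num : (0:Int) < 2)]
      omega
  all_goals
    have hroots : ∀ x ∈ newList num q, solP yellow x →
        x.1 + x.2 = s ∧ x.1 * x.2 = num ∧ (2 * x.1 - s) * (2 * x.1 - s) = disc ∧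
        q ≤ x.1 ∧ 1 ≤ x.1 ∧ 1 ≤ x.2 := by
      intro x hx hPx
      obtain ⟨hprod, hsum, hxq, hx1, hx2⟩ := hmemP x hx hPx
      have hxs : x.1 + x.2 = s := by omega
      refine ⟨hxs, hprod, ?_, hxq, hx1, hx2⟩
      rw [hdiscdef]
      linear_combination 4 * x.1 * hxs - 4 * hprod
  -- branch 2: negative discriminant, no divisor pair can match
  · apply solutionFind_none
    intro n hn hPn
    obtain ⟨hxs, hprod, hsq, hnq, hn1, hn2⟩ := hroots n hn hPn
    have := mul_self_nonneg (2 * n.1 - s)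
    linarith
  all_goals
    have hdisc0 : 0 ≤ disc := by omega
  -- branch 3: discriminant not a perfect square, no divisor pair can match
  · apply solutionFind_none
    intro n hn hPn
    obtain ⟨hxs, hprod, hsq, hnq, hn1, hn2⟩ := hroots n hn hPn
    exact c3 (by rw [hrdef]; exact sqrtInt_of_sq hsq)
  all_goals have hr2 : r * r = disc := not_not.mp c3
  all_goals
    have hr0 : 0 ≤ r := by rw [hrdef]; exact Int.natCast_nonneg _
  all_goals
    have heven : (s - r) * (s + r) = 4 * num := by
      linear_combination (-1) * hr2 - hdiscdef
  all_goals
    have hev : Even (s + r) := by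
      rcases Int.even_mul.mp (⟨2 * num, by linarith [heven]⟩ : Even ((s - r) * (s + r))) with he | he
      · rcases he with ⟨k, hk⟩
        exact ⟨k + r, by omega⟩
      · exact he
  all_goals
    have hw2 : 2 * w = s + r := by
      rcases hev with ⟨k, hk⟩
      rw [hwdef, PySem.Int.floordiv_eq_ediv_of_pos (by norm_num : (0:Int) < 2)]
      omega
  all_goals
    have hh2 : 2 * (s - w) = s - r := by omega
  all_goals
    have hwh : w * (s - w) = num := by
      have h4 : (2 * w) * (2 * (s - w)) = (s + r) * (s - r) := by rw [hw2, hh2]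
      have h4' : 4 * (w * (s - w)) = 4 * num := by linear_combination h4 + heven
      linarith
  -- branch 4: the smaller root is below 2; only a degenerate pair could match,
  -- which is either skipped (n[1] = 1) or lies in D_solution (excluded)
  · apply solutionFind_none
    intro n hn hPn
    obtain ⟨hxs, hprod, hsq, hnq, hn1, hn2⟩ := hroots n hn hPn
    have hfac : (2 * n.1 - s - r) * (2 * n.1 - s + r) = 0 := by
      linear_combination hsq - hr2
    rcases mul_eq_zero.mp hfac with h0 | h0
    · -- n.1 is the larger root w, so n.2 = s - w < 2, hence n.2 = 1: skipped
      have hn1w : n.1 = w := by omega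
      exact hPn.1 (by omega)
    · -- n.1 is the smaller root: n.1 = 1, num ≤ 3, the two inputs of D_solution
      have hn1h : n.1 = s - w := by omega
      have hone : n.1 = 1 := by omega
      have hq1' : q = 1 := by omega
      have hnum3 : num ≤ 3 := by
        have : num < 2 * 2 := by calc num < (q+1)*(q+1) := hq3
                                      _ = 2 * 2 := by rw [hq1']; norm_num
        omega
      have hn2num : n.2 = num := by
        have := hprod
        rw [hone] at this
        omega
      have hy : yellow = 2 - num := by
        have harea := hPn.2
        rw [hone, hn2num] at harea
        ring_nf at harea
        omega
      have hnn1 : n.2 ≠ 1 := hPn.1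
      have h23 : num = 2 ∨ num = 3 := by omega
      rcases h23 with h | h
      · exact hD (Or.inl ⟨by omega, by omega⟩)
      · exact hD (Or.inr ⟨by omega, by omega⟩)
  -- branch 5: a valid board exists; A's scan returns exactly (w, s - w)
  · have hc4 : 2 ≤ s - w := by omega
    have hhw : s - w ≤ w := by omega
    have hw2' : 2 ≤ w := by omega
    have hqw : q ≤ w := by
      rw [hqdef]
      exact sqrtInt_le_of_sq_le hpre (by omega) (by nlinarith [hwh])
    have hwle : w ≤ num := by nlinarith [hwh]
    have hdvd : w ∣ num := ⟨s - w, hwh.symm⟩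
    have hdivw : num / w = s - w := by
      rw [← hwh]
      exact Int.mul_ediv_cancel_left _ (by omega)
    have hmem : ((w, s - w) : Int × Int) ∈ newList num q := by
      have := newList_mem_of (by omega : 0 < w) hqw hwle hdvd
      rwa [hdivw] at this
    have hP : solP yellow ((w, s - w) : Int × Int) := by
      refine ⟨by omega, ?_⟩
      have hws : w + (s - w) = s := by omega
      linear_combination hwh - 2 * hws + hnum - hs
    apply solutionFind_max yellow _ (newList_pairwise num q) _ hmem hP
    intro y hy hPy
    obtain ⟨hxs, hprod, hsq, hyq, hy1, hy2⟩ := hroots y hy hPy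
    have hfac : (2 * y.1 - s - r) * (2 * y.1 - s + r) = 0 := by
      linear_combination hsq - hr2
    rcases mul_eq_zero.mp hfac with h0 | h0 <;> omega

-- ===== VERDICT (by name: the statement is the Claim_ definition above) =====
theorem solution_spec : Claim_unchanged_solution :=
  fun brown yellow _ hpre hD => solution_main brown yellow hpre hD

theorem solution_changed : Claim_changed_solution := by
  unfold Claim_changed_solution; decide

theorem solution_tight : Claim_exact_solution := by
  intro brown yellow _ _ hD
  rcases hD with ⟨hb, hy⟩ | ⟨hb, hy⟩ <;> subst hb <;> subst hy <;> decide
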